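-- pv_equiv track=rewrite | github.com/zhuny/Codejam | LongestProgression/__main__.py | do_one_list
-- ===== SOURCE A (Python) =====
-- def match(num_list, a, b, i):
--     return num_list[i] == a*i + b
--
-- def travel(num_list, a, b, i):
--     while i < len(num_list) and match(num_list, a, b, i):
--         i += 1
--     return i-1
--
-- def do_one_list(n, num_list):
--     i = 1
--     answer = min(3, n)
--     while i < n:
--         a = num_list[i] - num_list[i-1]
--         b = num_list[i] - a*i
--
--         j = travel(num_list, a, b, i)
--         if j+2 < n and match(num_list, a, b, j+2):
--             k = travel(num_list, a, b, j+2)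
--             answer = max(answer, k-i+2)
--         else:
--             answer = max(answer, min(n, j+2)-i+1)
--         i = j+1
--
--     return answer
-- ===== SOURCE B (Python) =====
-- def do_one_list(n, num_list):
--     # Run-length formulation: precompute the difference array and, per position,
--     # the length of the run of equal consecutive differences starting there;
--     # each maximal run then yields its candidate length by pure arithmetic.
--     L = len(num_list)
--     d = [0] * L
--     for k in range(1, L):
--         d[k] = num_list[k] - num_list[k - 1]
--     r = [0] * (L + 1)
--     for k in range(L - 1, 0, -1):
--         r[k] = r[k + 1] + 1 if k + 1 < L and d[k + 1] == d[k] else 1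
--     answer = min(3, n)
--     i = 1
--     while i < n:
--         j = i + r[i] - 1
--         if j + 2 < n and d[j + 1] + d[j + 2] == 2 * d[i]:
--             ext = r[j + 3] if j + 3 < L and d[j + 3] == d[i] else 0
--             answer = max(answer, (j + 2 + ext) - i + 2)
--         else:
--             answer = max(answer, min(n, j + 2) - i + 1)
--         i = j + 1
--     return answer
-- ===== Notes on version B (the rewrite author's own statement) =====
-- stated objective: alternative
-- what changed: Replaces A's line-fitting greedy (helpers match/travel re-scanning the list with y = a*x + b) by a precomputed difference array and a run-length array built in one backward pass, so each maximal run's candidate length is obtained by O(1) arithmetic instead of rescanning.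
import Mathlib
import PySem

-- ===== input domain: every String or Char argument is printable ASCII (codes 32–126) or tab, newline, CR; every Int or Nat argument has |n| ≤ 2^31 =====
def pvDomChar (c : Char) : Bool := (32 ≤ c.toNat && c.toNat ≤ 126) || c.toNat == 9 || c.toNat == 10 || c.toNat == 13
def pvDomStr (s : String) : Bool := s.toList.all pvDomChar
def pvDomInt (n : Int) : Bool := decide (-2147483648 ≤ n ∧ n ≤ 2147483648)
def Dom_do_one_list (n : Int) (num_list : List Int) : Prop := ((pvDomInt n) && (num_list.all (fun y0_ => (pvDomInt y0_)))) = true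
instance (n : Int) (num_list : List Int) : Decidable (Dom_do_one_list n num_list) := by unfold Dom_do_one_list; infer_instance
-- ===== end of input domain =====

-- B replaces A's line-fitting greedy scan (travel/match with y = a*x + b) by precomputed
-- difference and run-length arrays, each run's candidate obtained by pure arithmetic (objective: alternative).

-- ===== PORT A =====
-- num_list[i] == a*i + b ; indices are only read inside Pre_, so default 0 is exact there
def pymatch (num_list : List Int) (a b i : Int) : Bool :=
  PySem.List.pyGetD num_list i 0 == a * i + b

def travel (num_list : List Int) (a b i : Int) : Int :=
  if h : i < (num_list.length : Int) ∧ pymatch num_list a b i then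
    travel num_list a b (i + 1)
  else i - 1
termination_by ((num_list.length : Int) - i).toNat
decreasing_by omega

-- the while-loop of do_one_list; fuel = n.toNat suffices since i strictly increases below n
def aLoop (n : Int) (num_list : List Int) : Nat → Int → Int → Int
  | 0, _, answer => answer
  | fuel + 1, i, answer =>
    if i < n then
      let a := PySem.List.pyGetD num_list i 0 - PySem.List.pyGetD num_list (i - 1) 0
      let b := PySem.List.pyGetD num_list i 0 - a * i
      let j := travel num_list a b i
      let answer' :=
        if j + 2 < n ∧ pymatch num_list a b (j + 2) then
          max answer (travel num_list a b (j + 2) - i + 2)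
        else
          max answer (min n (j + 2) - i + 1)
      aLoop n num_list fuel (j + 1) answer'
    else answer

def do_one_list (n : Int) (num_list : List Int) : Int :=
  aLoop n num_list n.toNat 1 (min 3 n)

-- ===== PORT B =====
-- d = [num_list[k] - num_list[k-1] if k else 0 for k in range(L)]
def dArr (num_list : List Int) : List Int :=
  (List.range num_list.length).map
    (fun k => if 0 < k then num_list.getD k 0 - num_list.getD (k - 1) 0 else 0)

-- for k in range(L-1, 0, -1): r[k] = r[k+1]+1 if k+1 < L and d[k+1]==d[k] else 1
-- (counter m is the next index to process; call with m = L-1)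
def rBuild (d : List Int) (L : Nat) : Nat → List Int → List Int
  | 0, r => r
  | m + 1, r =>
    rBuild d L m
      (r.set (m + 1)
        (if m + 2 < L ∧ d.getD (m + 2) 0 = d.getD (m + 1) 0 then r.getD (m + 2) 0 + 1 else 1))

-- the while-loop of B; fuel = n.toNat suffices since i strictly increases below n
def bLoop (n : Int) (L : Int) (d r : List Int) : Nat → Int → Int → Int
  | 0, _, answer => answer
  | fuel + 1, i, answer =>
    if i < n then
      let j := i + PySem.List.pyGetD r i 0 - 1
      let answer' :=
        if j + 2 < n ∧ PySem.List.pyGetD d (j + 1) 0 + PySem.List.pyGetD d (j + 2) 0 = 2 * PySem.List.pyGetD d i 0 then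
          let ext := if j + 3 < L ∧ PySem.List.pyGetD d (j + 3) 0 = PySem.List.pyGetD d i 0
                     then PySem.List.pyGetD r (j + 3) 0 else 0
          max answer ((j + 2 + ext) - i + 2)
        else
          max answer (min n (j + 2) - i + 1)
      bLoop n L d r fuel (j + 1) answer'
    else answer

def do_one_list_alt (n : Int) (num_list : List Int) : Int :=
  let L := num_list.length
  let d := dArr num_list
  let r := rBuild d L (L - 1) (List.replicate (L + 1) 0)
  bLoop n (L : Int) d r n.toNat 1 (min 3 n)

-- ===== PRECONDITION & SPEC =====
-- A raises IndexError exactly when n ≥ 2 and n > len(num_list); it returns on every other input, so no input A returns on is excluded.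
def Pre_do_one_list (n : Int) (num_list : List Int) : Prop := n ≤ (num_list.length : Int) ∨ n ≤ 1
instance (n : Int) (num_list : List Int) : Decidable (Pre_do_one_list n num_list) := by unfold Pre_do_one_list; infer_instance
def pvWitness_do_one_list : Int × List Int := (4, [3, 5, 7, 10])

def Spec_do_one_list (n : Int) (num_list : List Int) (out : Int) : Prop := out = do_one_list_alt n num_list
instance (n : Int) (num_list : List Int) (out : Int) : Decidable (Spec_do_one_list n num_list out) := by unfold Spec_do_one_list; infer_instance

-- ===== CLAIM (what is proved, stated in full; the proofs are below) =====
def Claim_equal_do_one_list : Prop := ∀ (n : Int) (num_list : List Int), Dom_do_one_list n num_list → Pre_do_one_list n num_list → Spec_do_one_list n num_list (do_one_list n num_list)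

-- ===== LEMMAS AND PROOFS =====

-- length of the run of equal consecutive differences starting at k
def runlen (d : List Int) (L : Nat) (k : Nat) : Int :=
  if h : k + 1 < L ∧ d.getD (k + 1) 0 = d.getD k 0 then runlen d L (k + 1) + 1 else 1
termination_by L - k

-- how far travel advances from p, measured on the difference array with slope a
def arun (d : List Int) (L a : Int) (p : Int) : Int :=
  if h : p + 1 < L ∧ PySem.List.pyGetD d (p + 1) 0 = a then arun d L a (p + 1) + 1 else 1
termination_by (L - p).toNat
decreasing_by omega

theorem rBuild_getD (d : List Int) (L : Nat) :
    ∀ (m : Nat) (r : List Int), r.length = L + 1 → m < L →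
      (∀ t : Nat, m < t → t < L → r.getD t 0 = runlen d L t) →
      ∀ t : Nat, 1 ≤ t → t < L → (rBuild d L m r).getD t 0 = runlen d L t := by
  intro m
  induction m with
  | zero =>
    intro r _ _ hr t ht1 htL
    exact hr t (by omega) htL
  | succ m ih =>
    intro r hlen hmL hr t ht1 htL
    show (rBuild d L m _).getD t 0 = runlen d L t
    apply ih _ (by simp [hlen]) (by omega) _ t ht1 htL
    intro t' hmt' ht'L
    by_cases he : t' = m + 1
    · subst he
      rw [List.getD_eq_getElem?_getD, List.getElem?_set_self (by omega), Option.getD_some]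
      rw [runlen]
      by_cases hc : m + 2 < L ∧ d.getD (m + 2) 0 = d.getD (m + 1) 0
      · rw [if_pos hc, dif_pos hc, hr (m + 2) (by omega) (by omega)]
      · rw [if_neg hc, dif_neg hc]
    · have hne : m + 1 ≠ t' := by omega
      simp only [List.getD_eq_getElem?_getD, List.getElem?_set_ne hne]
      rw [← List.getD_eq_getElem?_getD]
      exact hr t' (by omega) ht'L

theorem dval (g : List Int) (i : Int) (h0 : 0 < i) (hL : i < (g.length : Int)) :
    PySem.List.pyGetD (dArr g) i 0 =
      PySem.List.pyGetD g i 0 - PySem.List.pyGetD g (i - 1) 0 := by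
  rw [PySem.List.pyGetD_of_nonneg _ _ (by omega), PySem.List.pyGetD_of_nonneg _ _ (by omega),
      PySem.List.pyGetD_of_nonneg _ _ (by omega)]
  unfold dArr
  rw [PySem.List.getD_map_range _ _ _ _ (by omega : i.toNat < g.length)]
  rw [if_pos (by omega : 0 < i.toNat)]
  congr 2
  omega

theorem arun_pos (d : List Int) (L a : Int) : ∀ (c : Nat) (p : Int), (L - p).toNat ≤ c →
    1 ≤ arun d L a p := by
  intro c
  induction c with
  | zero => intro p hp; rw [arun, dif_neg (by omega)]
  | succ c ih =>
    intro p hp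
    rw [arun]
    split
    · have := ih (p + 1) (by omega)
      omega
    · omega

theorem arun_runlen (d : List Int) (L : Nat) (a : Int) : ∀ (c k : Nat), L - k ≤ c →
    d.getD k 0 = a → arun d (L : Int) a (k : Int) = runlen d L k := by
  intro c
  induction c with
  | zero =>
    intro k hc hk
    rw [arun, runlen, dif_neg (by omega), dif_neg (by omega)]
  | succ c ih =>
    intro k hc hk
    have hcast : (k : Int) + 1 = ((k + 1 : Nat) : Int) := by push_cast; ring
    rw [arun, runlen]
    by_cases h : k + 1 < L ∧ d.getD (k + 1) 0 = a
    · have hD : PySem.List.pyGetD d ((k : Int) + 1) 0 = a := by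
        rw [hcast, PySem.List.pyGetD_natCast]; exact h.2
      rw [dif_pos ⟨by exact_mod_cast h.1, hD⟩, dif_pos ⟨h.1, by rw [h.2, hk]⟩]
      have := ih (k + 1) (by omega) h.2
      rw [hcast, this]
    · have hD : ¬((k : Int) + 1 < (L : Int) ∧ PySem.List.pyGetD d ((k : Int) + 1) 0 = a) := by
        rintro ⟨h1, h2⟩
        rw [hcast, PySem.List.pyGetD_natCast] at h2
        exact h ⟨by exact_mod_cast h1, h2⟩
      rw [dif_neg hD, dif_neg (by rintro ⟨h1, h2⟩; exact h ⟨h1, by rw [h2, hk]⟩)]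

theorem pymatch_iff (g : List Int) (a b i : Int) :
    pymatch g a b i = true ↔ PySem.List.pyGetD g i 0 = a * i + b := by
  simp [pymatch]

theorem travel_eq (g : List Int) (a b : Int) : ∀ (c : Nat) (p : Int),
    ((g.length : Int) - p).toNat ≤ c → 0 ≤ p → p < (g.length : Int) → pymatch g a b p = true →
    travel g a b p = p + arun (dArr g) (g.length : Int) a p - 1 ∧
    pymatch g a b (p + arun (dArr g) (g.length : Int) a p - 1) = true := by
  intro c
  induction c with
  | zero => intro p hc hp0 hpL hm; omega
  | succ c ih =>
    intro p hc hp0 hpL hm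
    rw [arun]
    by_cases h : p + 1 < (g.length : Int) ∧ PySem.List.pyGetD (dArr g) (p + 1) 0 = a
    · have hm1 : pymatch g a b (p + 1) = true := by
        rw [pymatch_iff] at hm ⊢
        have hd := dval g (p + 1) (by omega) h.1
        rw [h.2, show p + 1 - 1 = p from by ring] at hd
        have e : PySem.List.pyGetD g (p + 1) 0 = a + (a * p + b) := by rw [← hm]; linarith [hd]
        rw [e]; ring
      rw [dif_pos h]
      rw [show travel g a b p = travel g a b (p + 1) from by rw [travel, dif_pos ⟨hpL, hm⟩]]
      obtain ⟨ih1, ih2⟩ := ih (p + 1) (by omega) (by omega) h.1 hm1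
      constructor
      · rw [ih1]; ring
      · have e : p + (arun (dArr g) (↑g.length) a (p + 1) + 1) - 1
            = p + 1 + arun (dArr g) (↑g.length) a (p + 1) - 1 := by ring
        rw [e]; exact ih2
    · rw [dif_neg h]
      have e : p + 1 - 1 = p := by ring
      rw [e]
      refine ⟨?_, hm⟩
      rw [travel, dif_pos ⟨hpL, hm⟩, travel, dif_neg ?_]
      · omega
      · rintro ⟨h1, h2⟩
        apply h
        refine ⟨h1, ?_⟩
        rw [pymatch_iff] at hm h2
        have hd := dval g (p + 1) (by omega) h1
        rw [show p + 1 - 1 = p from by ring] at hd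
        rw [hd, h2, hm]; ring

theorem r_getD (d : List Int) (L : Nat) (t : Nat) (h1 : 1 ≤ t) (h2 : t < L) :
    (rBuild d L (L - 1) (List.replicate (L + 1) 0)).getD t 0 = runlen d L t := by
  exact rBuild_getD d L (L - 1) _ (by simp) (by omega)
    (fun t' h' h'' => absurd h'' (by omega)) t h1 h2

theorem loop_eq (g : List Int) (n : Int) (hn : n ≤ (g.length : Int) ∨ n ≤ 1) :
    ∀ (fuel : Nat) (i answer : Int), 1 ≤ i →
      aLoop n g fuel i answer =
        bLoop n (g.length : Int) (dArr g)
          (rBuild (dArr g) g.length (g.length - 1) (List.replicate (g.length + 1) 0)) fuel i answer := by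
  intro fuel
  induction fuel with
  | zero => intros; rfl
  | succ fuel ih =>
    intro i answer hi
    by_cases hin : i < n
    · rw [aLoop, bLoop]
      simp only [if_pos hin]
      have hn' : n ≤ (g.length : Int) := by rcases hn with h | h <;> omega
      have hiL : i < (g.length : Int) := lt_of_lt_of_le hin hn' 
      set d := dArr g with hd_def
      set r := rBuild d g.length (g.length - 1) (List.replicate (g.length + 1) 0) with hr_def
      set a := PySem.List.pyGetD g i 0 - PySem.List.pyGetD g (i - 1) 0 with ha_def
      set b := PySem.List.pyGetD g i 0 - a * i with hb_def
      have ha : PySem.List.pyGetD d i 0 = a := dval g i (by omega) hiL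
      have hm : pymatch g a b i = true := by rw [pymatch_iff, hb_def]; ring
      obtain ⟨hj, hmj⟩ := travel_eq g a b (((g.length : Int) - i).toNat) i le_rfl (by omega) hiL hm
      set J := travel g a b i with hJ_def
      rw [← hd_def] at hj hmj
      rw [← hj] at hmj
      have harun : arun d (g.length : Int) a i = runlen d g.length i.toNat := by
        have hdi : d.getD i.toNat 0 = a := by
          rw [← PySem.List.pyGetD_of_nonneg d 0 (by omega : (0:Int) ≤ i)]; exact ha
        have h2 := arun_runlen d g.length a g.length i.toNat (by omega) hdi
        rwa [show ((i.toNat : Nat) : Int) = i from by omega] at h2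
      have hrval : ∀ t : Int, 1 ≤ t → t < (g.length : Int) →
          PySem.List.pyGetD r t 0 = runlen d g.length t.toNat := by
        intro t ht1 htL
        rw [PySem.List.pyGetD_of_nonneg r 0 (by omega : (0:Int) ≤ t), hr_def]
        exact r_getD d g.length t.toNat (by omega) (by omega)
      have hjeq : i + PySem.List.pyGetD r i 0 - 1 = J := by
        rw [hrval i (by omega) hiL, ← harun, hj]
      have hjge : i ≤ J := by
        have := arun_pos d (g.length : Int) a (((g.length : Int) - i).toNat) i le_rfl
        omega
      rw [hjeq]
      by_cases hlt : J + 2 < n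
      · have hd1 := dval g (J + 1) (by omega) (by omega)
        have hd2 := dval g (J + 2) (by omega) (by omega)
        rw [show J + 1 - 1 = J from by ring] at hd1
        rw [show J + 2 - 1 = J + 1 from by ring] at hd2
        rw [pymatch_iff] at hmj
        have hcond : (pymatch g a b (J + 2) = true)
            ↔ (PySem.List.pyGetD d (J + 1) 0 + PySem.List.pyGetD d (J + 2) 0 = 2 * PySem.List.pyGetD d i 0) := by
          rw [pymatch_iff, hd1, hd2, ha]
          constructor
          · intro h; rw [h, hmj]; ring
          · intro h
            have : PySem.List.pyGetD g (J + 2) 0 = 2 * a + PySem.List.pyGetD g J 0 := by linarith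
            rw [this, hmj]; ring
        by_cases hbr : pymatch g a b (J + 2) = true
        · rw [if_pos ⟨hlt, hbr⟩, if_pos ⟨hlt, hcond.mp hbr⟩]
          obtain ⟨hk, _⟩ := travel_eq g a b (((g.length : Int) - (J + 2)).toNat) (J + 2) le_rfl
            (by omega) (by omega) hbr
          rw [← hd_def] at hk
          have hext : arun d (g.length : Int) a (J + 2) - 1
              = (if J + 3 < (g.length : Int) ∧ PySem.List.pyGetD d (J + 3) 0 = PySem.List.pyGetD d i 0
                 then PySem.List.pyGetD r (J + 3) 0 else 0) := by
            rw [arun, ha]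
            by_cases hc3 : J + 2 + 1 < (g.length : Int) ∧ PySem.List.pyGetD d (J + 2 + 1) 0 = a
            · rw [dif_pos hc3, if_pos (by
                refine ⟨by omega, ?_⟩
                have := hc3.2
                rwa [show J + 2 + 1 = J + 3 from by ring] at this)]
              have hd3 : d.getD (J + 3).toNat 0 = a := by
                rw [← PySem.List.pyGetD_of_nonneg d 0 (by omega : (0:Int) ≤ J + 3),
                  show ((J + 3 : Int)) = J + 2 + 1 from by ring]
                exact hc3.2
              have h4 := arun_runlen d g.length a g.length (J + 3).toNat (by omega) hd3
              rw [show (((J + 3).toNat : Nat) : Int) = J + 3 from by omega] at h4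
              rw [show J + 2 + 1 = J + 3 from by ring, h4,
                hrval (J + 3) (by omega) (by omega)]
              ring
            · rw [dif_neg hc3, if_neg (by
                rintro ⟨h1, h2⟩
                exact hc3 ⟨by omega, by rwa [show J + 2 + 1 = J + 3 from by ring]⟩)]
              ring
          rw [hk, ← hext]
          have e : J + 2 + (arun d (↑g.length) a (J + 2) - 1) - i + 2
              = J + 2 + arun d (↑g.length) a (J + 2) - 1 - i + 2 := by ring
          rw [e]
          exact ih (J + 1) _ (by omega)
        · rw [if_neg (by rintro ⟨_, hb2⟩; exact hbr hb2),
            if_neg (by rintro ⟨_, hb2⟩; exact hbr (hcond.mpr hb2))]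
          exact ih (J + 1) _ (by omega)
      · rw [if_neg (by rintro ⟨h1, _⟩; exact hlt h1),
          if_neg (by rintro ⟨h1, _⟩; exact hlt h1)]
        exact ih (J + 1) _ (by omega)
    · rw [aLoop, bLoop]
      simp [hin]

-- ===== VERDICT (by name: the statement is the Claim_ definition above) =====
theorem do_one_list_spec : Claim_equal_do_one_list := by
  intro n g _ hpre
  unfold Spec_do_one_list do_one_list do_one_list_alt
  exact loop_eq g n hpre n.toNat 1 (min 3 n) (by norm_num)
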